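-- pv_equiv track=rewrite | github.com/Jon-Landaluce/conecta4py | juego_functions.py | victoria_horizontal_fila
-- ===== SOURCE A (Python) =====
-- def victoria_horizontal_fila(tab, pos_fila, valor_ficha):
--
--     contador_iguales = 0
--
--     for columna in tab:
--         if columna[pos_fila] == valor_ficha:
--             contador_iguales += 1
--         else:
--             contador_iguales = 0
--         if contador_iguales == 4:
--             return True
--
--     return False
-- ===== SOURCE B (Python) =====
-- def victoria_horizontal_fila(tab, pos_fila, valor_ficha):
--     fila = [columna[pos_fila] for columna in tab]
--     i = 0
--     while i + 3 < len(fila):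
--         if fila[i] == fila[i + 1] == fila[i + 2] == fila[i + 3] == valor_ficha:
--             return True
--         i += 1
--     return False
-- ===== Notes on version B (the rewrite author's own statement) =====
-- stated objective: alternative
-- what changed: B first extracts the target row as an explicit list and then finds a run with a sliding-window scan over window start indices, instead of A's single pass with a running consecutive-match counter.
-- outside the precondition, e.g. on victoria_horizontal_fila([[1], [1], [1], [1], []], 0, 1): A returns True, B raises IndexError
import Mathlib
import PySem

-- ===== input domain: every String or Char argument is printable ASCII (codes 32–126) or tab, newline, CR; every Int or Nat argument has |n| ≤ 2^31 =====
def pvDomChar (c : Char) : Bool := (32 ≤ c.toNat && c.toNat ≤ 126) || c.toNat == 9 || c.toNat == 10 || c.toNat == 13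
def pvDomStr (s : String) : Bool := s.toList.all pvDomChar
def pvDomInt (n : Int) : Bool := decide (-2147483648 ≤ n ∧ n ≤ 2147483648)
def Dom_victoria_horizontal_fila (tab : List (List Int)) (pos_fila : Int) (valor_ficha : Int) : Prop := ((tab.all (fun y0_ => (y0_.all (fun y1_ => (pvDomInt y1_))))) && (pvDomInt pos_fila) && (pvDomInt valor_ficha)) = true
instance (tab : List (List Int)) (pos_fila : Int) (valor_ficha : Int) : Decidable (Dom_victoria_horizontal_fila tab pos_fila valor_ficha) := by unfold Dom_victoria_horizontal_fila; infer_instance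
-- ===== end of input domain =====

-- B extracts the row first and finds a run by a sliding-window index scan instead of A's
-- running-counter pass (objective: alternative decomposition, same cost).

-- ===== PORT A =====
-- A's loop over the columns with the running counter `contador_iguales`.
def pvALoop (pos_fila valor_ficha : Int) : List (List Int) → Nat → Bool
  | [], _ => false
  | columna :: rest, contador =>
    match PySem.List.pyGet? columna pos_fila with
    | none => false   -- Python raises IndexError here; excluded by Pre_
    | some x =>
      let contador' := if x = valor_ficha then contador + 1 else 0
      if contador' = 4 then true else pvALoop pos_fila valor_ficha rest contador'

def victoria_horizontal_fila (tab : List (List Int)) (pos_fila : Int) (valor_ficha : Int) : Bool :=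
  pvALoop pos_fila valor_ficha tab 0

-- ===== PORT B =====
-- the while loop `while i + 3 < len(fila)` of Source B, recursion on the remaining indices
def pvBLoop (fila : List Int) (valor_ficha : Int) (i : Nat) : Bool :=
  if i + 3 < fila.length then
    if fila.getD i 0 = fila.getD (i+1) 0 ∧ fila.getD (i+1) 0 = fila.getD (i+2) 0 ∧
       fila.getD (i+2) 0 = fila.getD (i+3) 0 ∧ fila.getD (i+3) 0 = valor_ficha then true
    else pvBLoop fila valor_ficha (i+1)
  else false
termination_by fila.length - i

def victoria_horizontal_fila_alt (tab : List (List Int)) (pos_fila : Int) (valor_ficha : Int) : Bool :=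
  pvBLoop (tab.map (fun columna => (PySem.List.pyGet? columna pos_fila).getD 0)) valor_ficha 0

-- ===== PRECONDITION & SPEC =====
-- Pre_ excludes inputs where some column lacks index pos_fila (Python IndexError in general);
-- A can still return True early when four matches occur before the short column, but B raises
-- there while building the row, so those inputs are excluded too.
def Pre_victoria_horizontal_fila (tab : List (List Int)) (pos_fila : Int) (valor_ficha : Int) : Prop :=
  ∀ columna ∈ tab, PySem.Raise.InRange columna.length pos_fila
instance (tab : List (List Int)) (pos_fila : Int) (valor_ficha : Int) : Decidable (Pre_victoria_horizontal_fila tab pos_fila valor_ficha) := by unfold Pre_victoria_horizontal_fila; infer_instance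
def pvWitness_victoria_horizontal_fila : List (List Int) × Int × Int := ([[1],[1],[2],[1]], 0, 1)

def Spec_victoria_horizontal_fila (tab : List (List Int)) (pos_fila : Int) (valor_ficha : Int) (out : Bool) : Prop := out = victoria_horizontal_fila_alt tab pos_fila valor_ficha
instance (tab : List (List Int)) (pos_fila : Int) (valor_ficha : Int) (out : Bool) : Decidable (Spec_victoria_horizontal_fila tab pos_fila valor_ficha out) := by unfold Spec_victoria_horizontal_fila; infer_instance

-- ===== CLAIM (what is proved, stated in full; the proofs are below) =====
def Claim_equal_victoria_horizontal_fila : Prop := ∀ (tab : List (List Int)) (pos_fila : Int) (valor_ficha : Int), Dom_victoria_horizontal_fila tab pos_fila valor_ficha → Pre_victoria_horizontal_fila tab pos_fila valor_ficha → Spec_victoria_horizontal_fila tab pos_fila valor_ficha (victoria_horizontal_fila tab pos_fila valor_ficha)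

-- ===== LEMMAS AND PROOFS =====

-- proof-only view of a sliding-window scan: structural recursion on the row
def pvSlide (v : Int) : List Int → Bool
  | a :: b :: c :: d :: t => if a = b ∧ b = c ∧ c = d ∧ d = v then true else pvSlide v (b :: c :: d :: t)
  | _ => false
termination_by l => l.length

theorem pvSlide_short (v : Int) (l : List Int) (h : l.length ≤ 3) : pvSlide v l = false := by
  rcases l with _ | ⟨a, _ | ⟨b, _ | ⟨c, _ | ⟨d, t⟩⟩⟩⟩ <;> simp [pvSlide] at h ⊢
  omega

theorem pvSlide_cons_ne0 (v x : Int) (rest : List Int) (hx : x ≠ v) :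
    pvSlide v (x :: rest) = pvSlide v rest := by
  rcases rest with _ | ⟨b, _ | ⟨c, _ | ⟨d, t⟩⟩⟩ <;> simp [pvSlide]
  intro h1 h2 h3 h4
  exact absurd (h1.trans (h2.trans (h3.trans h4))) hx

theorem pvSlide_cons_ne1 (v x : Int) (rest : List Int) (hx : x ≠ v) :
    pvSlide v (v :: x :: rest) = pvSlide v rest := by
  rcases rest with _ | ⟨c, _ | ⟨d, t⟩⟩
  · simp [pvSlide]
  · simp [pvSlide]
  · rw [show pvSlide v (v :: x :: c :: d :: t) =
        if v = x ∧ x = c ∧ c = d ∧ d = v then true else pvSlide v (x :: c :: d :: t) from by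
          simp [pvSlide]]
    rw [if_neg (by rintro ⟨h1, -⟩; exact hx h1.symm), pvSlide_cons_ne0 v x _ hx]

theorem pvSlide_cons_ne2 (v x : Int) (rest : List Int) (hx : x ≠ v) :
    pvSlide v (v :: v :: x :: rest) = pvSlide v rest := by
  rcases rest with _ | ⟨d, t⟩
  · simp [pvSlide]
  · rw [show pvSlide v (v :: v :: x :: d :: t) =
        if v = v ∧ v = x ∧ x = d ∧ d = v then true else pvSlide v (v :: x :: d :: t) from by
          simp [pvSlide]]
    rw [if_neg (by rintro ⟨-, h2, -⟩; exact hx h2.symm), pvSlide_cons_ne1 v x _ hx]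

theorem pvSlide_cons_ne3 (v x : Int) (rest : List Int) (hx : x ≠ v) :
    pvSlide v (v :: v :: v :: x :: rest) = pvSlide v rest := by
  rw [show pvSlide v (v :: v :: v :: x :: rest) =
      if v = v ∧ v = v ∧ v = x ∧ x = v then true else pvSlide v (v :: v :: x :: rest) from by
        simp [pvSlide]]
  rw [if_neg (by rintro ⟨-, -, h3, -⟩; exact hx h3.symm), pvSlide_cons_ne2 v x _ hx]

theorem pvSlide_repl (v x : Int) (rest : List Int) (cnt : Nat) (hc : cnt ≤ 3) (hx : x ≠ v) :
    pvSlide v (List.replicate cnt v ++ x :: rest) = pvSlide v rest := by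
  interval_cases cnt
  · simpa using pvSlide_cons_ne0 v x rest hx
  · simpa [List.replicate] using pvSlide_cons_ne1 v x rest hx
  · simpa [List.replicate] using pvSlide_cons_ne2 v x rest hx
  · simpa [List.replicate] using pvSlide_cons_ne3 v x rest hx

-- A's counter scan equals the sliding window with cnt virtual matching pieces in front
theorem pvALoop_eq_slide (pos v : Int) :
    ∀ (tab : List (List Int)) (cnt : Nat), cnt ≤ 3 →
    (∀ c ∈ tab, PySem.Raise.InRange c.length pos) →
    pvALoop pos v tab cnt =
      pvSlide v (List.replicate cnt v ++ tab.map (fun c => (PySem.List.pyGet? c pos).getD 0)) := by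
  intro tab
  induction tab with
  | nil =>
    intro cnt hc _
    simp only [pvALoop, List.map_nil, List.append_nil]
    exact (pvSlide_short v _ (by simpa using hc)).symm
  | cons c rest ih =>
    intro cnt hc hpre
    obtain ⟨x, hx⟩ : ∃ x, PySem.List.pyGet? c pos = some x := by
      cases h : PySem.List.pyGet? c pos with
      | none => exact absurd (hpre c (by simp)) ((PySem.List.pyGet?_eq_none_iff _ _).1 h)
      | some y => exact ⟨y, rfl⟩
    have hrest : ∀ c' ∈ rest, PySem.Raise.InRange c'.length pos :=
      fun c' hc' => hpre c' (by simp [hc'])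
    simp only [pvALoop, hx, List.map_cons, Option.getD_some]
    by_cases hxv : x = v
    · rw [if_pos hxv]
      by_cases h3 : cnt = 3
      · subst h3
        rw [if_pos rfl, hxv]
        rw [show List.replicate 3 v ++ v :: List.map (fun c => (PySem.List.pyGet? c pos).getD 0) rest
            = v :: v :: v :: v :: List.map (fun c => (PySem.List.pyGet? c pos).getD 0) rest from by
              simp [List.replicate]]
        simp [pvSlide]
      · rw [if_neg (by omega), ih (cnt + 1) (by omega) hrest, hxv]
        congr 1
        rw [List.replicate_succ']
        simp
    · rw [if_neg hxv, if_neg (by omega), ih 0 (by omega) hrest,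
          pvSlide_repl v x _ cnt hc hxv]
      simp

-- B's index loop equals the sliding window on the dropped suffix
theorem pvBLoop_eq_slide (fila : List Int) (v : Int) :
    ∀ i, pvBLoop fila v i = pvSlide v (fila.drop i) := by
  intro i
  induction h : fila.length - i using Nat.strong_induction_on generalizing i with
  | _ k ihk =>
    subst h
    rw [pvBLoop]
    by_cases hlt : i + 3 < fila.length
    · rw [if_pos hlt]
      have h0 : i < fila.length := by omega
      have h1 : i + 1 < fila.length := by omega
      have h2 : i + 2 < fila.length := by omega
      have h3 : i + 3 < fila.length := hlt
      have hd : fila.drop i = fila[i] :: fila[i+1] :: fila[i+2] :: fila[i+3] :: fila.drop (i+4) := by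
        rw [List.drop_eq_getElem_cons h0, List.drop_eq_getElem_cons h1,
            List.drop_eq_getElem_cons h2, List.drop_eq_getElem_cons h3]
      have hd1 : fila.drop (i+1) = fila[i+1] :: fila[i+2] :: fila[i+3] :: fila.drop (i+4) := by
        rw [List.drop_eq_getElem_cons h1, List.drop_eq_getElem_cons h2, List.drop_eq_getElem_cons h3]
      rw [List.getD_eq_getElem _ _ h0, List.getD_eq_getElem _ _ h1,
          List.getD_eq_getElem _ _ h2, List.getD_eq_getElem _ _ h3, hd]
      simp only [pvSlide]
      rw [← hd1, ← ihk (fila.length - (i+1)) (by omega) (i+1) rfl]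
    · rw [if_neg hlt]
      exact (pvSlide_short v _ (by simp; omega)).symm

-- ===== VERDICT (by name: the statement is the Claim_ definition above) =====
theorem victoria_horizontal_fila_spec : Claim_equal_victoria_horizontal_fila := by
  intro tab pos v _ hpre
  unfold Spec_victoria_horizontal_fila victoria_horizontal_fila victoria_horizontal_fila_alt
  rw [pvALoop_eq_slide pos v tab 0 (by omega) hpre, pvBLoop_eq_slide]
  simp
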